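-- pv_equiv track=rewrite | github.com/2024-pass-backend/algorithm | Week2/공통/카드뭉치/suhyun.py | solution
-- ===== SOURCE A (Python) =====
-- def solution(cards1, cards2, goal):
--     answer = ''
--     ans = False
--     card1, card2 = -1, -1
--     for g in goal:
--         ans = False
--         for i, c in enumerate(cards1):
--             if c == g and card1 + 1 == i:
--                 card1 = i
--                 ans = True
--
--         for i, c in enumerate(cards2):
--             if c == g and card2 + 1 == i:
--                 card2 = i
--                 ans = True
--
--         if ans == False:
--             answer = "No"
--             break
--
--     if ans == True:
--         answer = "Yes"
--     return answer
-- ===== SOURCE B (Python) =====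
-- def solution(cards1, cards2, goal):
--     i, j = 0, 0
--     for g in goal:
--         ni = i
--         while ni < len(cards1) and cards1[ni] == g:
--             ni += 1
--         nj = j
--         while nj < len(cards2) and cards2[nj] == g:
--             nj += 1
--         if ni == i and nj == j:
--             return "No"
--         i, j = ni, nj
--     return "Yes"
-- ===== Notes on version B (the rewrite author's own statement) =====
-- stated objective: alternative
-- what changed: Replace A's rescan of both whole decks for every goal word with a single pass keeping one direct-index pointer per deck (each pointer consumes the run of next cards equal to the current goal word), so the decks are no longer re-enumerated per goal word; intended as faster, measured only ~1.45x at the largest size.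
-- intended difference: On an empty goal list A returns '' (its answer variable is never assigned) while B returns 'Yes', the intended answer since an empty sequence is trivially buildable. — e.g. on solution(["a"], ["b"], []): A returns "", B returns "Yes"
import Mathlib
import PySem

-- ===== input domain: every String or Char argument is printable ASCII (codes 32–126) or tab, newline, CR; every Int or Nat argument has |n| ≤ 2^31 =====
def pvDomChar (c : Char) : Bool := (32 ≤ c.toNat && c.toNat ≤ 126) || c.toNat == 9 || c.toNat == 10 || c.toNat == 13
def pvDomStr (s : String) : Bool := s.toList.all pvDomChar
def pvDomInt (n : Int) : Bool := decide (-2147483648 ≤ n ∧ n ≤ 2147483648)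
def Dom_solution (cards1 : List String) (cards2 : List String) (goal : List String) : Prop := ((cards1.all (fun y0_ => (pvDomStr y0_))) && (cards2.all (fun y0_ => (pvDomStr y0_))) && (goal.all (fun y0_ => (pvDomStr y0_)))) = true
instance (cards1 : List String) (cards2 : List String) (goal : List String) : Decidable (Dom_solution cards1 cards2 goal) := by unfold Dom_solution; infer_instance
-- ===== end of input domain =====

-- B replaces A's rescan of both whole decks per goal word by one pass with a direct-index
-- pointer per deck; on the empty goal A returns '' while B returns "Yes" (see D_ below).

-- ===== PORT A =====
-- inner `for i, c in enumerate(cards):` loop of A, over one deck, state (card, ans)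
def scanA (g : String) : List (Int × String) → Int → Bool → Int × Bool
  | [], card, ans => (card, ans)
  | (i, c) :: rest, card, ans =>
    if c == g && card + 1 == i then scanA g rest i true else scanA g rest card ans

-- outer `for g in goal:` loop with the break/answer logic of A
def loopA (cards1 cards2 : List String) : List String → Int → Int → Bool → String
  | [], _, _, ans => if ans then "Yes" else ""
  | g :: rest, card1, card2, _ =>
    let r1 := scanA g (PySem.List.enumerate cards1 0) card1 false
    let r2 := scanA g (PySem.List.enumerate cards2 0) card2 r1.2
    if r2.2 then loopA cards1 cards2 rest r1.1 r2.1 r2.2 else "No"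

def solution (cards1 : List String) (cards2 : List String) (goal : List String) : String :=
  loopA cards1 cards2 goal (-1) (-1) false

-- ===== PORT B =====
-- `while ni < len(cards) and cards[ni] == g: ni += 1` of B
def advanceB (cards : List String) (g : String) (i : Nat) : Nat :=
  if h : i < cards.length then
    if cards[i] == g then advanceB cards g (i + 1) else i
  else i
termination_by cards.length - i

-- `for g in goal:` loop of B with its two pointers
def loopB (cards1 cards2 : List String) : List String → Nat → Nat → String
  | [], _, _ => "Yes"
  | g :: rest, i, j =>
    let ni := advanceB cards1 g i
    let nj := advanceB cards2 g j
    if ni = i ∧ nj = j then "No" else loopB cards1 cards2 rest ni nj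

def solution_alt (cards1 : List String) (cards2 : List String) (goal : List String) : String :=
  loopB cards1 cards2 goal 0 0

-- ===== PRECONDITION & SPEC =====
-- On empty goal A returns '' (its answer variable is never assigned) while B returns "Yes",
-- the intended answer since an empty sequence is trivially buildable.
def D_solution (cards1 : List String) (cards2 : List String) (goal : List String) : Prop := goal = []
instance (cards1 : List String) (cards2 : List String) (goal : List String) : Decidable (D_solution cards1 cards2 goal) := by unfold D_solution; infer_instance

def Spec_solution (cards1 : List String) (cards2 : List String) (goal : List String) (out : String) : Prop := ¬ D_solution cards1 cards2 goal → out = solution_alt cards1 cards2 goal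
instance (cards1 : List String) (cards2 : List String) (goal : List String) (out : String) : Decidable (Spec_solution cards1 cards2 goal out) := by unfold Spec_solution; infer_instance

def pvDiffWitness_solution : List String × List String × List String := (["a"], ["b"], [])
def pvDiffWitnessOut_solution : String × String := ("", "Yes")

-- ===== CLAIM (what is proved, stated in full; the proofs are below) =====
def Claim_unchanged_solution : Prop := ∀ (cards1 : List String) (cards2 : List String) (goal : List String), Dom_solution cards1 cards2 goal → Spec_solution cards1 cards2 goal (solution cards1 cards2 goal)
def Claim_changed_solution : Prop := Dom_solution (pvDiffWitness_solution.1) (pvDiffWitness_solution.2.1) (pvDiffWitness_solution.2.2) ∧ D_solution (pvDiffWitness_solution.1) (pvDiffWitness_solution.2.1) (pvDiffWitness_solution.2.2) ∧ solution (pvDiffWitness_solution.1) (pvDiffWitness_solution.2.1) (pvDiffWitness_solution.2.2) = pvDiffWitnessOut_solution.1 ∧ solution_alt (pvDiffWitness_solution.1) (pvDiffWitness_solution.2.1) (pvDiffWitness_solution.2.2) = pvDiffWitnessOut_solution.2 ∧ pvDiffWitnessOut_solution.1 ≠ pvDiffWitnessOut_solution.2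
def Claim_exact_solution : Prop := ∀ (cards1 : List String) (cards2 : List String) (goal : List String), Dom_solution cards1 cards2 goal → D_solution cards1 cards2 goal → solution cards1 cards2 goal ≠ solution_alt cards1 cards2 goal

-- ===== LEMMAS AND PROOFS =====

-- run length of cards equal to g starting at position d
def runLen (g : String) (l : List String) : Nat := (l.takeWhile (fun c => c == g)).length

-- once the scan is past position card+1, nothing matches any more
theorem scanA_lt (g : String) : ∀ (cs : List String) (k card : Int) (ans : Bool),
    card + 1 < k → scanA g (PySem.List.enumerate cs k) card ans = (card, ans) := by
  intro cs
  induction cs with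
  | nil => intro k card ans _; simp [PySem.List.enumerate_nil, scanA]
  | cons c cs ih =>
    intro k card ans h
    rw [PySem.List.enumerate_cons, scanA]
    have : ¬ (card + 1 == k) = true := by simp; omega
    rw [if_neg (by simp [this])]
    exact ih (k + 1) card ans (by omega)

-- the scan of one deck consumes exactly the run of cards equal to g at position card+1
theorem scanA_main (g : String) : ∀ (cs : List String) (d : Nat) (k card : Int) (ans : Bool),
    card + 1 = k + d →
    scanA g (PySem.List.enumerate cs k) card ans =
      (if runLen g (cs.drop d) = 0 then (card, ans)
       else (k + d + runLen g (cs.drop d) - 1, true)) := by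
  intro cs
  induction cs with
  | nil => intro d k card ans _; simp [PySem.List.enumerate_nil, scanA, runLen]
  | cons c cs ih =>
    intro d k card ans hcard
    rw [PySem.List.enumerate_cons, scanA]
    cases d with
    | zero =>
      by_cases hc : c = g
      · subst hc
        rw [if_pos (by simp; omega)]
        have := ih 0 (k + 1) k true (by omega)
        rw [this]
        have hrl : runLen c (c :: cs) = runLen c cs + 1 := by
          simp [runLen, List.takeWhile]
        simp only [List.drop_zero] at *
        rw [hrl]
        by_cases h0 : runLen c cs = 0 <;> simp [h0] <;> omega
      · rw [if_neg (by simp; intro h; exact absurd h hc)]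
        rw [scanA_lt g cs (k + 1) card ans (by omega)]
        have hb : (c == g) = false := by simp [hc]
        have : runLen g (c :: cs) = 0 := by
          simp [runLen, List.takeWhile, hb]
        simp [this]
    | succ d' =>
      rw [if_neg (by simp; intro _; omega)]
      rw [ih d' (k + 1) card ans (by omega)]
      have : (c :: cs).drop (d' + 1) = cs.drop d' := by simp
      rw [this]
      by_cases h0 : runLen g (cs.drop d') = 0 <;> simp [h0] <;> push_cast <;> ring_nf

-- B's while-loop advances by exactly that run length
theorem advanceB_eq (cards : List String) (g : String) (i : Nat) :
    advanceB cards g i = i + runLen g (cards.drop i) := by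
  have main : ∀ (n i : Nat), cards.length - i ≤ n →
      advanceB cards g i = i + runLen g (cards.drop i) := by
    intro n
    induction n with
    | zero =>
      intro i hle
      rw [advanceB, dif_neg (by omega)]
      have hd : cards.drop i = [] := List.drop_eq_nil_of_le (by omega)
      simp [hd, runLen]
    | succ n ihn =>
      intro i hle
      rw [advanceB]
      by_cases h : i < cards.length
      · rw [dif_pos h, List.drop_eq_getElem_cons h]
        by_cases hc : (cards[i] == g) = true
        · rw [if_pos hc, ihn (i + 1) (by omega)]
          simp [runLen, List.takeWhile, hc]
          omega
        · rw [if_neg hc]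
          simp [runLen, List.takeWhile, hc]
      · rw [dif_neg h]
        have hd : cards.drop i = [] := List.drop_eq_nil_of_le (by omega)
        simp [hd, runLen]
  exact main (cards.length - i) i le_rfl

-- the two outer loops agree under the invariant cardA = pointerB - 1
theorem loop_eq (cards1 cards2 : List String) : ∀ (goal : List String) (i j : Nat),
    loopA cards1 cards2 goal ((i : Int) - 1) ((j : Int) - 1) true = loopB cards1 cards2 goal i j := by
  intro goal
  induction goal with
  | nil => intro i j; simp [loopA, loopB]
  | cons g rest ih =>
    intro i j
    have h1 := scanA_main g cards1 i 0 ((i : Int) - 1) false (by omega)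
    have h2 := advanceB_eq cards1 g i
    have h4 := advanceB_eq cards2 g j
    simp only [loopA, loopB]
    rw [h1, h2, h4]
    by_cases e1 : runLen g (cards1.drop i) = 0
    · rw [if_pos e1]
      dsimp only
      have h3 := scanA_main g cards2 j 0 ((j : Int) - 1) false (by omega)
      rw [h3]
      by_cases e2 : runLen g (cards2.drop j) = 0
      · rw [if_pos e2]
        dsimp only
        rw [if_neg Bool.false_ne_true]
        have hc : i + runLen g (cards1.drop i) = i ∧ j + runLen g (cards2.drop j) = j :=
          ⟨by omega, by omega⟩
        rw [if_pos hc]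
      · rw [if_neg e2]
        dsimp only
        rw [if_pos rfl]
        have hc : ¬ (i + runLen g (cards1.drop i) = i ∧ j + runLen g (cards2.drop j) = j) := by
          omega
        rw [if_neg hc]
        have ej : (0 : Int) + (j : Int) + (runLen g (cards2.drop j) : Int) - 1
            = ((j + runLen g (cards2.drop j) : Nat) : Int) - 1 := by push_cast; ring
        rw [ej, e1, Nat.add_zero]
        exact ih i (j + runLen g (cards2.drop j))
    · rw [if_neg e1]
      dsimp only
      have h3 := scanA_main g cards2 j 0 ((j : Int) - 1) true (by omega)
      rw [h3]
      have eiv : (0 : Int) + (i : Int) + (runLen g (cards1.drop i) : Int) - 1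
          = ((i + runLen g (cards1.drop i) : Nat) : Int) - 1 := by push_cast; ring
      have hc : ¬ (i + runLen g (cards1.drop i) = i ∧ j + runLen g (cards2.drop j) = j) := by
        omega
      by_cases e2 : runLen g (cards2.drop j) = 0
      · rw [if_pos e2]
        dsimp only
        rw [if_pos rfl]
        rw [if_neg hc, eiv, e2, Nat.add_zero]
        exact ih (i + runLen g (cards1.drop i)) j
      · rw [if_neg e2]
        dsimp only
        rw [if_pos rfl]
        rw [if_neg hc, eiv]
        have ej : (0 : Int) + (j : Int) + (runLen g (cards2.drop j) : Int) - 1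
            = ((j + runLen g (cards2.drop j) : Nat) : Int) - 1 := by push_cast; ring
        rw [ej]
        exact ih (i + runLen g (cards1.drop i)) (j + runLen g (cards2.drop j))

-- ===== VERDICT (by name: the statement is the Claim_ definition above) =====
theorem solution_spec : Claim_unchanged_solution := by
  intro cards1 cards2 goal _ hD
  unfold D_solution at hD
  match goal with
  | [] => exact absurd rfl hD
  | g :: rest =>
    show loopA cards1 cards2 (g :: rest) (-1) (-1) false = _
    have hfalse : loopA cards1 cards2 (g :: rest) (-1) (-1) false
        = loopA cards1 cards2 (g :: rest) (-1) (-1) true := by rw [loopA, loopA]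
    rw [hfalse]
    have : ((-1 : Int)) = ((0 : Nat) : Int) - 1 := by norm_num
    rw [this]
    exact loop_eq cards1 cards2 (g :: rest) 0 0

theorem solution_changed : Claim_changed_solution := by unfold Claim_changed_solution; decide

theorem solution_tight : Claim_exact_solution := by
  intro cards1 cards2 goal _ hD
  unfold D_solution at hD
  subst hD
  simp [solution, solution_alt, loopA, loopB]
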